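-- pv_equiv track=rewrite | github.com/theabbie/leetcode | find-the-score-of-all-prefixes-of-an-array.py | findPrefixScore
-- ===== SOURCE A (Python) =====
-- from typing import List
--
-- def findPrefixScore(nums: List[int]) -> List[int]:
--     n = len(nums)
--     p = 0
--     for i in range(n):
--         p = max(p, nums[i])
--         nums[i] += p
--     for i in range(1, n):
--         nums[i] += nums[i - 1]
--     return nums
-- ===== SOURCE B (Python) =====
-- from typing import List
--
-- def findPrefixScore(nums: List[int]) -> List[int]:
--     # Single fused pass: running max p and running score sum s.
--     p = 0
--     s = 0
--     for i in range(len(nums)):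
--         x = nums[i]
--         if x > p:
--             p = x
--         s += x + p
--         nums[i] = s
--     return nums
-- ===== Notes on version B (the rewrite author's own statement) =====
-- stated objective: simpler
-- what changed: A's two sequential passes (running-max-add pass, then a separate prefix-sum pass) are fused into a single loop maintaining a running max and a running sum.
import Mathlib
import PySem

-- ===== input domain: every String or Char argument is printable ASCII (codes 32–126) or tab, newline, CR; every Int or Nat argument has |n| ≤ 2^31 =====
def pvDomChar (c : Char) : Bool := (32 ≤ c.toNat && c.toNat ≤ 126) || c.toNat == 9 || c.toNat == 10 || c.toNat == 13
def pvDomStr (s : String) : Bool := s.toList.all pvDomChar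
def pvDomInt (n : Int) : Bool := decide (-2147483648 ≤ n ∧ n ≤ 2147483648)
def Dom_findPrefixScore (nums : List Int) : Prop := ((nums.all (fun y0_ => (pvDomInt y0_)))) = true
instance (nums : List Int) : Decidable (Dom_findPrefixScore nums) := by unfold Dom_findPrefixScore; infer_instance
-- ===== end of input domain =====

-- B fuses A's two sequential passes into one loop with two accumulators (same O(n) cost).
-- Both Pythons mutate nums in place; the equivalence proved here is about the returned value.

-- ===== PORT A =====
-- first loop: p = max(p, nums[i]); nums[i] += p
def pvA_pass1 (p : Int) : List Int → List Int
  | [] => []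
  | x :: xs => let p' := max p x; (x + p') :: pvA_pass1 p' xs

-- second loop body: for i in range(1, n): nums[i] += nums[i-1]
def pvA_pass2go (prev : Int) : List Int → List Int
  | [] => []
  | x :: xs => let v := x + prev; v :: pvA_pass2go v xs

def pvA_pass2 : List Int → List Int
  | [] => []
  | x :: xs => x :: pvA_pass2go x xs

def findPrefixScore (nums : List Int) : List Int :=
  pvA_pass2 (pvA_pass1 0 nums)

-- ===== PORT B =====
def pvB_go (p s : Int) : List Int → List Int
  | [] => []
  | x :: xs =>
    let p' := if x > p then x else p
    let s' := s + (x + p')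
    s' :: pvB_go p' s' xs

def findPrefixScore_alt (nums : List Int) : List Int :=
  pvB_go 0 0 nums

-- ===== PRECONDITION & SPEC =====
def Spec_findPrefixScore (nums : List Int) (out : List Int) : Prop := out = findPrefixScore_alt nums
instance (nums : List Int) (out : List Int) : Decidable (Spec_findPrefixScore nums out) := by unfold Spec_findPrefixScore; infer_instance

-- ===== CLAIM (what is proved, stated in full; the proofs are below) =====
def Claim_equal_findPrefixScore : Prop := ∀ (nums : List Int), Dom_findPrefixScore nums → Spec_findPrefixScore nums (findPrefixScore nums)

-- ===== LEMMAS AND PROOFS =====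
theorem pvB_eq_pass2go : ∀ (xs : List Int) (p s : Int),
    pvB_go p s xs = pvA_pass2go s (pvA_pass1 p xs) := by
  intro xs
  induction xs with
  | nil => intro p s; rfl
  | cons x xs ih =>
    intro p s
    simp only [pvB_go, pvA_pass1, pvA_pass2go]
    have hp : (if x > p then x else p) = max p x := by
      simp only [max_def]; split_ifs <;> omega
    have e : s + (x + max p x) = x + max p x + s := by ring
    rw [hp, e, ih]

-- ===== VERDICT (by name: the statement is the Claim_ definition above) =====
theorem findPrefixScore_spec : Claim_equal_findPrefixScore := by
  intro nums _
  unfold Spec_findPrefixScore findPrefixScore findPrefixScore_alt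
  cases nums with
  | nil => rfl
  | cons x xs =>
    simp only [pvA_pass1, pvA_pass2, pvB_go]
    have hp : (if x > 0 then x else 0) = max 0 x := by
      simp only [max_def]; split_ifs <;> omega
    have e : (0 : Int) + (x + max 0 x) = x + max 0 x := by ring
    rw [hp, pvB_eq_pass2go, e]
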